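-- pv_equiv track=rewrite | github.com/alexanderad/python-callfire | swagger/swagger2definition.py | _get_method_kwargs
-- ===== SOURCE A (Python) =====
-- def _get_method_kwargs(params, default=None):
--     """Returns path kwargs declaration.
--
--     :param params: params
--     :return path kwargs declaration.
--     """
--     has_query_params = any([p for p in params if p['in'] == 'query'])
--     has_body_params = any([p for p in params if p['in'] == 'body'])
--
--     declarations = []
--     if has_query_params:
--         value = default
--         if default == 'self':
--             value = 'query'
--         declarations.append('query={}'.format(value))
--
--     if has_body_params:
--         value = default
--         if default == 'self':
--             value = 'body'
--         declarations.append('body={}'.format(value))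
--
--     return declarations
-- ===== SOURCE B (Python) =====
-- def _get_method_kwargs(params, default=None):
--     qv = 'query' if default == 'self' else default
--     bv = 'body' if default == 'self' else default
--     table = [[],
--              ['query={}'.format(qv)],
--              ['body={}'.format(bv)],
--              ['query={}'.format(qv), 'body={}'.format(bv)]]
--     mask = 0
--     for p in params:
--         loc = p['in']
--         if loc == 'query':
--             mask |= 1
--         elif loc == 'body':
--             mask |= 2
--         if mask == 3:
--             break
--     return table[mask]
-- ===== Notes on version B (the rewrite author's own statement) =====
-- stated objective: alternative
-- what changed: Replaced A's two independent filtered any() scans plus two copy-pasted append blocks by a single early-exiting scan that accumulates a 2-bit presence mask and a direct lookup in a precomputed 4-entry table of declaration lists.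
import Mathlib
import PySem

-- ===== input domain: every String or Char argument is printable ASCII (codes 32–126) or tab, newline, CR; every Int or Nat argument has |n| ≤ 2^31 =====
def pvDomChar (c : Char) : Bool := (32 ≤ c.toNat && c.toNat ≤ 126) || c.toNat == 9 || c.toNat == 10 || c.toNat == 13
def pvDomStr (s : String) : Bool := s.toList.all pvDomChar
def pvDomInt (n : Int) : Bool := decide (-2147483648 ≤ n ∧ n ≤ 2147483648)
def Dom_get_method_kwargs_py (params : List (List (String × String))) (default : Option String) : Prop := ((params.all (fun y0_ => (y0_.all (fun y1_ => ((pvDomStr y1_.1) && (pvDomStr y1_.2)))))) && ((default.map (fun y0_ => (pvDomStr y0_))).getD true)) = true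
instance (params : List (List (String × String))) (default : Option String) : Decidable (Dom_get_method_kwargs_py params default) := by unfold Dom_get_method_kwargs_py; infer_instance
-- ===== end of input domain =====

-- B replaces A's two independent filtered any() scans and twin append blocks by one
-- early-exiting scan building a 2-bit presence mask plus a 4-entry result table (objective: alternative).

-- 'str(value)' for an Optional[str] value: None prints as "None".
def pvFmtOpt (v : Option String) : String :=
  match v with
  | none => "None"
  | some s => s

-- ===== PORT A =====
def get_method_kwargs_py (params : List (List (String × String))) (default : Option String) : List String :=
  -- any([p for p in params if p['in'] == 'query']): truthiness of the kept dicts (nonempty) is tested.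
  -- p['in'] (KeyError when the key is absent) is lookup; Pre_ excludes the KeyError inputs.
  let has_query_params :=
    ((params.filter (fun p => List.lookup "in" p == some "query")).any (fun p => !p.isEmpty))
  let has_body_params :=
    ((params.filter (fun p => List.lookup "in" p == some "body")).any (fun p => !p.isEmpty))
  let declarations : List String := []
  let declarations :=
    if has_query_params then
      declarations ++ ["query=" ++ pvFmtOpt (if default == some "self" then some "query" else default)]
    else declarations
  let declarations :=
    if has_body_params then
      declarations ++ ["body=" ++ pvFmtOpt (if default == some "self" then some "body" else default)]
    else declarations
  declarations

-- ===== PORT B =====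
-- the for-loop with 'break': a recursion over params carrying the mask, stopping at 3.
-- (p['in'] totalised with getD ""; under Pre_ the key is always present, so the default never fires)
def pvMaskLoop (params : List (List (String × String))) (mask : Nat) : Nat :=
  match params with
  | [] => mask
  | p :: ps =>
    let loc := (List.lookup "in" p).getD ""
    let mask := if loc == "query" then mask ||| 1 else if loc == "body" then mask ||| 2 else mask
    if mask == 3 then mask else pvMaskLoop ps mask

def get_method_kwargs_py_alt (params : List (List (String × String))) (default : Option String) : List String :=
  let qv := if default == some "self" then "query" else pvFmtOpt default
  let bv := if default == some "self" then "body" else pvFmtOpt default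
  let table : List (List String) :=
    [[], ["query=" ++ qv], ["body=" ++ bv], ["query=" ++ qv, "body=" ++ bv]]
  let mask := pvMaskLoop params 0
  (table[mask]?).getD []   -- table[mask]; mask < 4 always

-- ===== PRECONDITION & SPEC =====
-- Pre_ excludes only the inputs where Python A raises KeyError: some param dict lacks the 'in' key.
def Pre_get_method_kwargs_py (params : List (List (String × String))) (default : Option String) : Prop :=
  ∀ p ∈ params, List.lookup "in" p ≠ none
instance (params : List (List (String × String))) (default : Option String) : Decidable (Pre_get_method_kwargs_py params default) := by unfold Pre_get_method_kwargs_py; infer_instance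

def pvWitness_get_method_kwargs_py : (List (List (String × String))) × Option String :=
  ([[("in", "query")], [("in", "body"), ("name", "x")]], some "self")

def Spec_get_method_kwargs_py (params : List (List (String × String))) (default : Option String) (out : List String) : Prop := out = get_method_kwargs_py_alt params default
instance (params : List (List (String × String))) (default : Option String) (out : List String) : Decidable (Spec_get_method_kwargs_py params default out) := by unfold Spec_get_method_kwargs_py; infer_instance

-- ===== CLAIM =====
def Claim_equal_get_method_kwargs_py : Prop := ∀ (params : List (List (String × String))) (default : Option String), Dom_get_method_kwargs_py params default → Pre_get_method_kwargs_py params default → Spec_get_method_kwargs_py params default (get_method_kwargs_py params default)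

-- ===== LEMMAS AND PROOFS =====

-- B's mask loop computes the bitwise-or of the start mask with the presence bits,
-- provided the start mask is one of 0..3 and every dict has the 'in' key.
theorem pvMaskLoop_eq (params : List (List (String × String))) (m : Nat) (hm : m < 4)
    (hpre : ∀ p ∈ params, List.lookup "in" p ≠ none) :
    pvMaskLoop params m
      = (m ||| (if params.any (fun p => List.lookup "in" p == some "query") then 1 else 0))
          ||| (if params.any (fun p => List.lookup "in" p == some "body") then 2 else 0) := by
  induction params generalizing m with
  | nil => simp [pvMaskLoop]
  | cons p ps ih =>
    have hp : List.lookup "in" p ≠ none := hpre p (by simp)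
    have hps := fun m hm => ih m hm (fun q hq => hpre q (by simp [hq]))
    obtain ⟨v, hv⟩ := Option.ne_none_iff_exists'.mp hp
    simp only [pvMaskLoop, List.any_cons, hv, Option.getD_some]
    by_cases hvq : v = "query"
    · subst hvq
      simp only [beq_self_eq_true, if_true, Bool.true_or,
        show (((some "query" : Option String) == some "body") = false) from by decide,
        Bool.false_or]
      by_cases h3 : m ||| 1 = 3
      · rw [if_pos (by simpa using h3), h3]
        split_ifs <;> decide
      · rw [if_neg (by simpa using h3), hps _ (by interval_cases m <;> decide)]
        interval_cases m <;> split_ifs <;> decide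
    · by_cases hvb : v = "body"
      · subst hvb
        simp only [beq_self_eq_true, if_true, Bool.true_or, Bool.false_or,
          show (((some "body" : Option String) == some "query") = false) from by decide,
          show (("body" == "query") = false) from by decide, Bool.false_eq_true, if_false]
        by_cases h3 : m ||| 2 = 3
        · rw [if_pos (by simpa using h3)]
          interval_cases m <;>
            first
            | exact absurd h3 (by decide)
            | (split_ifs <;> decide)
        · rw [if_neg (by simpa using h3), hps _ (by interval_cases m <;> decide)]
          interval_cases m <;> split_ifs <;> decide
      · have e1 : ((v == "query") = false) := by simpa using hvq
        have e2 : ((v == "body") = false) := by simpa using hvb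
        have e3 : ((some v : Option String) == some "query") = false := by
          simpa using hvq
        have e4 : ((some v : Option String) == some "body") = false := by
          simpa using hvb
        simp only [e1, e2, e3, e4, Bool.false_or, Bool.false_eq_true, if_false]
        by_cases h3 : m = 3
        · subst h3
          rw [if_pos (by decide)]
          split_ifs <;> decide
        · rw [if_neg (by simpa using h3), hps _ hm]

-- A's filtered-any flag equals plain any over lookup, under Pre_.
theorem pv_flag_eq_any (params : List (List (String × String))) (loc : String)
    (hpre : ∀ p ∈ params, List.lookup "in" p ≠ none) :
    ((params.filter (fun p => List.lookup "in" p == some loc)).any (fun p => !p.isEmpty))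
      = params.any (fun p => List.lookup "in" p == some loc) := by
  induction params with
  | nil => simp
  | cons p ps ih =>
    have hp : List.lookup "in" p ≠ none := hpre p (by simp)
    have hps := ih (fun q hq => hpre q (by simp [hq]))
    obtain ⟨v, hv⟩ := Option.ne_none_iff_exists'.mp hp
    have hpne : p ≠ [] := by intro h; subst h; simp [List.lookup] at hv
    by_cases hvl : v = loc
    · subst hvl; simp [hv, List.any_cons, hpne]
    · simp [hv, hvl, List.any_cons, hps]

-- ===== VERDICT =====
theorem get_method_kwargs_py_spec : Claim_equal_get_method_kwargs_py := by
  intro params default _hdom hpre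
  unfold Spec_get_method_kwargs_py get_method_kwargs_py get_method_kwargs_py_alt
  rw [pvMaskLoop_eq params 0 (by decide) hpre,
      ← pv_flag_eq_any params "query" hpre, ← pv_flag_eq_any params "body" hpre]
  by_cases hq : ((params.filter (fun p => List.lookup "in" p == some "query")).any (fun p => !p.isEmpty)) = true <;>
  by_cases hb : ((params.filter (fun p => List.lookup "in" p == some "body")).any (fun p => !p.isEmpty)) = true <;>
  by_cases hd : default = some "self" <;>
  simp [hq, hb, hd, pvFmtOpt]
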